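-- pv_equiv track=rewrite | github.com/facebookresearch/BELA | bela/transforms/joint_el_transform.py | _calculate_alpha_num_boundaries
-- ===== SOURCE A (Python) =====
-- from typing import Any, Dict, List, Optional, Tuple
--
-- def _calculate_alpha_num_boundaries(texts: List[str]):
--     alpha_num_boundaries: List[List[List[int]]] = []
--     for text in texts:
--         example_alpha_num_boundaries: List[List[int]] = []
--         cur_alpha_num_start: int = -1
--         for idx, char in enumerate(text):
--             if char.isalnum():
--                 if cur_alpha_num_start == -1:
--                     cur_alpha_num_start = idx
--             else:
--                 if cur_alpha_num_start != -1:
--                     example_alpha_num_boundaries.append([cur_alpha_num_start, idx])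
--                     cur_alpha_num_start = -1
--
--         if cur_alpha_num_start != -1:
--             example_alpha_num_boundaries.append([cur_alpha_num_start, len(text)])
--
--         alpha_num_boundaries.append(example_alpha_num_boundaries)
--
--     return alpha_num_boundaries
-- ===== SOURCE B (Python) =====
-- def _calculate_alpha_num_boundaries(texts):
--     alpha_num_boundaries = []
--     for text in texts:
--         bounds = []
--         n = len(text)
--         i = 0
--         while i < n:
--             if text[i].isalnum():
--                 j = i + 1
--                 while j < n and text[j].isalnum():
--                     j += 1
--                 bounds.append([i, j])
--                 i = j
--             else:
--                 i += 1
--         alpha_num_boundaries.append(bounds)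
--     return alpha_num_boundaries
-- ===== Notes on version B (the rewrite author's own statement) =====
-- stated objective: alternative
-- what changed: Replaces A's -1-sentinel state machine over enumerate (with its trailing-run special case) by a two-pointer scanner that consumes each alphanumeric run whole with an inner scan, so no sentinel state and no post-loop fix-up are needed.
import Mathlib
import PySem

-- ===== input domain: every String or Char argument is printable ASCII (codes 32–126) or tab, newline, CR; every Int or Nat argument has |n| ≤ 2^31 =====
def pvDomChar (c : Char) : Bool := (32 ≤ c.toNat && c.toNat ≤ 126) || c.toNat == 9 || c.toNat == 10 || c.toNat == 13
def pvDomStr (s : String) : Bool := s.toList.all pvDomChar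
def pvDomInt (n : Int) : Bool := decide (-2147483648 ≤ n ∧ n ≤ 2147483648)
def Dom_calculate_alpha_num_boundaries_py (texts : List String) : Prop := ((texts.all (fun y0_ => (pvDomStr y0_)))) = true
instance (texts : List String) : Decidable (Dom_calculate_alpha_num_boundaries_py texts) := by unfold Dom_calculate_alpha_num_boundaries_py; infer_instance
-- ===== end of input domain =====

-- B replaces A's -1-sentinel state machine (with its trailing-run special case) by a
-- two-pointer run scanner; same cost, no sentinel state ("alternative").

-- ===== PORT A =====
-- the body of A's inner for-loop (its state: current run start or -1, boundaries so far)
def pvStepA (st : Int × List (List Int)) (p : Int × Char) : Int × List (List Int) :=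
  if PySem.Chars.isalnum p.2 then
    if st.1 == -1 then (p.1, st.2) else st
  else
    if st.1 != -1 then (-1, st.2 ++ [[st.1, p.1]]) else st

def calculate_alpha_num_boundaries_py (texts : List String) : List (List (List Int)) :=
  texts.foldl (fun acc text =>
    let cs := text.toList
    let st := (PySem.List.enumerate cs 0).foldl pvStepA (-1, [])
    let ex := if st.1 != -1 then st.2 ++ [[st.1, (cs.length : Int)]] else st.2
    acc ++ [ex]) []

-- ===== PORT B =====
-- the while-loop of B: scan a run with takeWhile/dropWhile (the inner `while j < n and ...` scan)
def pvBoundaries : List Char → Int → List (List Int)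
  | [], _ => []
  | c :: cs, pos =>
    if PySem.Chars.isalnum c then
      let stop := pos + 1 + (cs.takeWhile PySem.Chars.isalnum).length
      [pos, stop] :: pvBoundaries (cs.dropWhile PySem.Chars.isalnum) stop
    else
      pvBoundaries cs (pos + 1)
termination_by cs _ => cs.length
decreasing_by
  · exact Nat.lt_succ_of_le (List.length_dropWhile_le _ _)
  · exact Nat.lt_succ_self _

def calculate_alpha_num_boundaries_py_alt (texts : List String) : List (List (List Int)) :=
  texts.map (fun text => pvBoundaries text.toList 0)

-- ===== PRECONDITION & SPEC =====
def Spec_calculate_alpha_num_boundaries_py (texts : List String) (out : List (List (List Int))) : Prop := out = calculate_alpha_num_boundaries_py_alt texts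
instance (texts : List String) (out : List (List (List Int))) : Decidable (Spec_calculate_alpha_num_boundaries_py texts out) := by unfold Spec_calculate_alpha_num_boundaries_py; infer_instance

-- ===== CLAIM (what is proved, stated in full; the proofs are below) =====
def Claim_equal_calculate_alpha_num_boundaries_py : Prop := ∀ (texts : List String), Dom_calculate_alpha_num_boundaries_py texts → Spec_calculate_alpha_num_boundaries_py texts (calculate_alpha_num_boundaries_py texts)

-- ===== LEMMAS AND PROOFS =====
-- A's finalisation: append the pending run, if any
def pvFinal (r : Int × List (List Int)) (n : Int) : List (List Int) :=
  if r.1 != -1 then r.2 ++ [[r.1, n]] else r.2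

-- joint invariant of A's loop vs B's scanner: starting out of a run / inside a run begun at j
lemma pvLoop_eq (cs : List Char) :
    (∀ (s : Int) (acc : List (List Int)), 0 ≤ s →
      pvFinal ((PySem.List.enumerate cs s).foldl pvStepA (-1, acc)) (s + cs.length)
        = acc ++ pvBoundaries cs s)
    ∧ (∀ (s j : Int) (acc : List (List Int)), 0 ≤ s → 0 ≤ j →
      pvFinal ((PySem.List.enumerate cs s).foldl pvStepA (j, acc)) (s + cs.length)
        = acc ++ [[j, s + (cs.takeWhile PySem.Chars.isalnum).length]]
            ++ pvBoundaries (cs.dropWhile PySem.Chars.isalnum)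
                (s + (cs.takeWhile PySem.Chars.isalnum).length)) := by
  induction cs with
  | nil =>
    constructor
    · intro s acc _
      simp [PySem.List.enumerate_nil, pvFinal, pvBoundaries]
    · intro s j acc hs hj
      have hne : (j != -1) = true := by simp; omega
      simp [PySem.List.enumerate_nil, pvFinal, pvBoundaries, hne]
  | cons c cs ih =>
    constructor
    · intro s acc hs
      rw [PySem.List.enumerate_cons]
      by_cases h : PySem.Chars.isalnum c
      · simp only [List.foldl_cons, pvStepA, h, if_true]
        simp only [show ((-1 : Int) == -1) = true from rfl, if_true]
        rw [show (s + (((c :: cs).length : Nat) : Int)) = (s + 1) + (cs.length : Int) by simp [List.length_cons]; ring]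
        rw [ih.2 (s + 1) s acc (by omega) hs]
        simp [pvBoundaries, h, add_comm, add_left_comm]
      · simp only [List.foldl_cons, pvStepA, h, Bool.false_eq_true, if_false]
        simp only [show ((-1 : Int) != -1) = false from rfl, Bool.false_eq_true, if_false]
        rw [show (s + (((c :: cs).length : Nat) : Int)) = (s + 1) + (cs.length : Int) by simp [List.length_cons]; ring]
        rw [ih.1 (s + 1) acc (by omega)]
        simp [pvBoundaries, h]
    · intro s j acc hs hj
      have hne : (j == -1) = false := by simp; omega
      have hne' : (j != -1) = true := by simp; omega
      rw [PySem.List.enumerate_cons]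
      by_cases h : PySem.Chars.isalnum c
      · simp only [List.foldl_cons, pvStepA, h, if_true, hne, Bool.false_eq_true, if_false]
        rw [show (s + (((c :: cs).length : Nat) : Int)) = (s + 1) + (cs.length : Int) by simp [List.length_cons]; ring]
        rw [ih.2 (s + 1) j acc (by omega) hj]
        simp [h, add_comm, add_left_comm]
      · simp only [List.foldl_cons, pvStepA, h, Bool.false_eq_true, if_false, hne', if_true]
        rw [show (s + (((c :: cs).length : Nat) : Int)) = (s + 1) + (cs.length : Int) by simp [List.length_cons]; ring]
        rw [ih.1 (s + 1) (acc ++ [[j, s]]) (by omega)]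
        simp [pvBoundaries, h]

-- ===== VERDICT (by name: the statement is the Claim_ definition above) =====
theorem calculate_alpha_num_boundaries_py_spec : Claim_equal_calculate_alpha_num_boundaries_py := by
  intro texts _
  unfold Spec_calculate_alpha_num_boundaries_py
  unfold calculate_alpha_num_boundaries_py calculate_alpha_num_boundaries_py_alt
  rw [PySem.List.foldl_append_singleton_eq_map]
  refine List.map_congr_left (fun text _ => ?_)
  have h := (pvLoop_eq text.toList).1 0 [] le_rfl
  simpa [pvFinal] using h
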